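-- pv_equiv track=rewrite | github.com/openai/parameter-golf | records/track_non_record_16mb/2026-04-28_ModelStack_BitNet_MLP2304_Overtone_SP1024/train_gpt.py | build_sliding_eval_windows
-- ===== SOURCE A (Python) =====
-- def build_sliding_eval_windows(total_tokens: int, window_len: int, stride: int) -> list[tuple[int, int, int]]:
--     """Build overlapping eval windows whose scored spans partition the stream exactly once."""
--     if window_len <= 0:
--         raise ValueError(f"window_len must be positive, got {window_len}")
--     if stride <= 0:
--         raise ValueError(f"SLIDING_EVAL_STRIDE must be positive, got {stride}")
--     if stride > window_len:
--         raise ValueError(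
--             "SLIDING_EVAL_STRIDE must be <= TRAIN_SEQ_LEN to avoid uncovered gaps; "
--             f"got stride={stride}, train_seq_len={window_len}"
--         )
--     if total_tokens <= 0:
--         return []
--
--     last_start = max(total_tokens - window_len, 0)
--     starts = list(range(0, last_start + 1, stride))
--     if starts[-1] != last_start:
--         starts.append(last_start)
--
--     windows: list[tuple[int, int, int]] = []
--     prev_end = 0
--     for i, start in enumerate(starts):
--         end = min(start + window_len, total_tokens)
--         score_start = 0 if i == 0 else prev_end
--         if score_start < start:
--             raise RuntimeError(
--                 f"Sliding eval overlap accounting underflowed: start={start} score_start={score_start}"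
--             )
--         if score_start >= end:
--             raise RuntimeError(
--                 f"Sliding eval would score zero tokens: start={start} end={end} score_start={score_start}"
--             )
--         windows.append((start, end, score_start))
--         prev_end = end
--     if prev_end != total_tokens:
--         raise RuntimeError(f"Sliding eval ended at token {prev_end}, expected {total_tokens}")
--     return windows
-- ===== SOURCE B (Python) =====
-- def build_sliding_eval_windows(total_tokens: int, window_len: int, stride: int) -> list[tuple[int, int, int]]:
--     """Build overlapping eval windows whose scored spans partition the stream exactly once.
--
--     Walks the start positions BACKWARD from the last window: each window's
--     predecessor start is the largest multiple of stride strictly below it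
--     (closed form via floor division), and its score_start is simply the
--     predecessor's end. No start list, no prev_end accumulator, no checks.
--     """
--     if window_len <= 0:
--         raise ValueError(f"window_len must be positive, got {window_len}")
--     if stride <= 0:
--         raise ValueError(f"SLIDING_EVAL_STRIDE must be positive, got {stride}")
--     if stride > window_len:
--         raise ValueError(
--             "SLIDING_EVAL_STRIDE must be <= TRAIN_SEQ_LEN to avoid uncovered gaps; "
--             f"got stride={stride}, train_seq_len={window_len}"
--         )
--     if total_tokens <= 0:
--         return []
--     windows: list[tuple[int, int, int]] = []
--     s = max(total_tokens - window_len, 0)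
--     while s > 0:
--         p = ((s - 1) // stride) * stride  # predecessor start: largest multiple of stride below s
--         windows.append((s, min(s + window_len, total_tokens), min(p + window_len, total_tokens)))
--         s = p
--     windows.append((0, min(window_len, total_tokens), 0))
--     windows.reverse()
--     return windows
-- ===== Notes on version B (the rewrite author's own statement) =====
-- stated objective: alternative
-- what changed: B discards A's starts list, enumerate loop, prev_end accumulator and validation checks (unreachable under the argument guards) and instead walks the start positions backward from the last window, computing each predecessor start in closed form as ((s-1)//stride)*stride and each score_start as that predecessor's end, then reverses the built list.
import Mathlib
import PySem

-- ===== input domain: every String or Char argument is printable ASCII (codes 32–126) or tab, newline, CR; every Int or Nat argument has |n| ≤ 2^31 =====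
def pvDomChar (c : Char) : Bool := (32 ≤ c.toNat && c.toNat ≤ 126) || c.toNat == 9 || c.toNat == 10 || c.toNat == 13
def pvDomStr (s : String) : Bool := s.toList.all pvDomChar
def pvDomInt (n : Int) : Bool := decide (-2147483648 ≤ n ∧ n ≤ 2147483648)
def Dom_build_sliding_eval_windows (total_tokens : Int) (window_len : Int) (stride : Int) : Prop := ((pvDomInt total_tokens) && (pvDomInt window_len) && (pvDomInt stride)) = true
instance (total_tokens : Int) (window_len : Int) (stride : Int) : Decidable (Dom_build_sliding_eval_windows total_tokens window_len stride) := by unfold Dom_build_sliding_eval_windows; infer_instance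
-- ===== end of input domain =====

-- B replaces A's forward enumerate loop (prev_end accumulator + RuntimeError checks that are
-- unreachable under the argument guards) by a backward walk from the last start, computing each
-- predecessor start in closed form by floor division; objective: alternative decomposition.


-- ===== PORT A =====
-- the 'for i, start in enumerate(starts)' loop: i is the enumerate index, (windows, prev_end) the
-- carried state; 'none' is exactly where Python raises RuntimeError
def pvLoopA (W T : Int) : List Int → Nat → List (Int × Int × Int) → Int → Option (List (Int × Int × Int) × Int)
  | [], _, windows, prev_end => some (windows, prev_end)
  | start :: rest, i, windows, prev_end =>
    let e := min (start + W) T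
    let score_start := if i = 0 then 0 else prev_end
    if score_start < start then none            -- raise RuntimeError (overlap underflow)
    else if score_start ≥ e then none           -- raise RuntimeError (zero tokens)
    else pvLoopA W T rest (i + 1) (windows ++ [(start, e, score_start)]) e

def build_sliding_eval_windows (total_tokens : Int) (window_len : Int) (stride : Int) : List (Int × Int × Int) :=
  if window_len ≤ 0 then []                     -- Python: raise ValueError (outside Pre_)
  else if stride ≤ 0 then []                    -- Python: raise ValueError (outside Pre_)
  else if stride > window_len then []           -- Python: raise ValueError (outside Pre_)
  else if total_tokens ≤ 0 then []
  else
    let last_start := max (total_tokens - window_len) 0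
    let starts0 := PySem.List.pyRange 0 (last_start + 1) stride
    let starts :=
      match PySem.List.pyGet? starts0 (-1) with  -- starts[-1] (IndexError impossible: 0 ∈ range)
      | some x => if x ≠ last_start then starts0 ++ [last_start] else starts0
      | none => starts0
    match pvLoopA window_len total_tokens starts 0 [] 0 with
    | none => []                                 -- Python: raise RuntimeError (proved unreachable)
    | some (windows, prev_end) =>
        if prev_end ≠ total_tokens then [] else windows   -- 'if prev_end != total_tokens: raise'

-- ===== PORT B =====
-- the 'while s > 0' loop, building the window list in descending-start order (reversed at the end);
-- the '0 < st' conjunct only makes the recursion total — the entry point always passes 0 < stride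
def pvLoopB (W T st s : Int) : List (Int × Int × Int) :=
  if h : 0 < s ∧ 0 < st then
    let p := PySem.Int.floordiv (s - 1) st * st
    (s, min (s + W) T, min (p + W) T) :: pvLoopB W T st p
  else
    [(0, min (0 + W) T, 0)]                      -- the final append after the while loop
termination_by s.toNat
decreasing_by
  obtain ⟨hs, hst⟩ := h
  rw [PySem.Int.floordiv_eq_ediv_of_pos hst]
  have h3 := Int.mul_ediv_add_emod (s - 1) st
  have h1 := Int.emod_nonneg (s - 1) (ne_of_gt hst)
  have h4 : (s - 1) / st * st = st * ((s - 1) / st) := mul_comm _ _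
  omega

def build_sliding_eval_windows_alt (total_tokens : Int) (window_len : Int) (stride : Int) : List (Int × Int × Int) :=
  if window_len ≤ 0 then []                     -- Python: raise ValueError (outside Pre_)
  else if stride ≤ 0 then []                    -- Python: raise ValueError (outside Pre_)
  else if stride > window_len then []           -- Python: raise ValueError (outside Pre_)
  else if total_tokens ≤ 0 then []
  else
    (pvLoopB window_len total_tokens stride (max (total_tokens - window_len) 0)).reverse

-- ===== PRECONDITION & SPEC =====
-- Pre_ excludes exactly the inputs on which A raises ValueError (nonpositive window_len or stride,
-- or stride > window_len); A returns normally on every other input.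
def Pre_build_sliding_eval_windows (total_tokens : Int) (window_len : Int) (stride : Int) : Prop :=
  0 < window_len ∧ 0 < stride ∧ stride ≤ window_len
instance (total_tokens : Int) (window_len : Int) (stride : Int) : Decidable (Pre_build_sliding_eval_windows total_tokens window_len stride) := by unfold Pre_build_sliding_eval_windows; infer_instance
def pvWitness_build_sliding_eval_windows : Int × Int × Int := (10, 4, 2)

def Spec_build_sliding_eval_windows (total_tokens : Int) (window_len : Int) (stride : Int) (out : List (Int × Int × Int)) : Prop := out = build_sliding_eval_windows_alt total_tokens window_len stride
instance (total_tokens : Int) (window_len : Int) (stride : Int) (out : List (Int × Int × Int)) : Decidable (Spec_build_sliding_eval_windows total_tokens window_len stride out) := by unfold Spec_build_sliding_eval_windows; infer_instance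

-- ===== CLAIM (what is proved, stated in full; the proofs are below) =====
def Claim_equal_build_sliding_eval_windows : Prop := ∀ (total_tokens : Int) (window_len : Int) (stride : Int), Dom_build_sliding_eval_windows total_tokens window_len stride → Pre_build_sliding_eval_windows total_tokens window_len stride → Spec_build_sliding_eval_windows total_tokens window_len stride (build_sliding_eval_windows total_tokens window_len stride)

-- ===== LEMMAS AND PROOFS =====

-- the mathematical window list both programs compute: one window per start, prev = previous end
def pvWAux (W T : Int) : Int → List Int → List (Int × Int × Int)
  | _, [] => []
  | p, s :: rest => (s, min (s + W) T, p) :: pvWAux W T (min (s + W) T) rest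

lemma pvMapLastD (e : Int → Int) (l : List Int) (a d : Int) (h : l.getLast? = some a) :
    (l.map e).getLastD d = e a := by
  rw [List.getLastD_eq_getLast?, List.getLast?_map, h]; rfl

lemma pvWAux_append (W T : Int) : ∀ (l : List Int) (p b : Int),
    pvWAux W T p (l ++ [b]) =
      pvWAux W T p l ++ [(b, min (b + W) T, (l.map (fun s => min (s + W) T)).getLastD p)] := by
  intro l
  induction l with
  | nil => intro p b; rfl
  | cons s l' ih =>
    intro p b
    simp only [List.cons_append, pvWAux, List.map_cons, List.getLastD_cons, ih]

-- A's loop on a suffix of the starts list (enumerate index ≠ 0), under the invariants that make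
-- both RuntimeError branches unreachable: it returns pvWAux plus the last end
lemma pvLoopA_tail (W T st L : Int) (hstW : st ≤ W) (hL : L = max (T - W) 0) :
    ∀ (ss : List Int) (i : Nat) (p : Int) (acc : List (Int × Int × Int)),
      i ≠ 0 →
      List.IsChain (fun a b => a < b ∧ b ≤ a + st) ss →
      (∀ x ∈ ss, 0 ≤ x ∧ x ≤ L) →
      (∀ s, ss.head? = some s → s ≤ p ∧ p < s + W ∧ p < T) →
      pvLoopA W T ss i acc p =
        some (acc ++ pvWAux W T p ss, (ss.map (fun s => min (s + W) T)).getLastD p) := by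
  intro ss
  induction ss with
  | nil => intro i p acc _ _ _ _; simp [pvLoopA, pvWAux]
  | cons s rest ih =>
    intro i p acc hi hchain hmem hhead
    obtain ⟨hsp, hpW, hpT⟩ := hhead s rfl
    have hnotlt : ¬ p < s := not_lt.mpr hsp
    have hplt : p < min (s + W) T := lt_min hpW hpT
    simp only [pvLoopA, if_neg hi, if_neg hnotlt, if_neg (not_le.mpr hplt)]
    cases rest with
    | nil => simp [pvLoopA, pvWAux]
    | cons s' rest' =>
      rw [List.isChain_cons_cons] at hchain
      obtain ⟨⟨hss', hgap⟩, hchain'⟩ := hchain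
      have hmem' : ∀ x ∈ s' :: rest', 0 ≤ x ∧ x ≤ L := fun x hx => hmem x (List.mem_cons_of_mem _ hx)
      have hs'L : 0 ≤ s' ∧ s' ≤ L := hmem' s' (List.mem_cons_self)
      have hsWT : s + W < T := by
        rcases le_or_gt W T with h | h
        · omega
        · have hs0 : 0 ≤ s := (hmem s List.mem_cons_self).1
          omega
      have hhead' : ∀ t, (s' :: rest').head? = some t →
          t ≤ min (s + W) T ∧ min (s + W) T < t + W ∧ min (s + W) T < T := by
        intro t ht
        simp only [List.head?_cons, Option.some.injEq] at ht
        subst ht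
        refine ⟨?_, ?_, ?_⟩ <;> omega
      rw [ih (i + 1) (min (s + W) T) (acc ++ [(s, min (s + W) T, p)]) (by omega) hchain' hmem' hhead']
      simp only [pvWAux, List.map_cons, List.getLastD_cons]
      simp

-- the whole post-guard computation of A equals pvWAux 0, for any starts list S of the right shape
lemma pvCore (W T st : Int) (hW : 0 < W) (hstW : st ≤ W) (hT : 0 < T)
    (S : List Int)
    (hchain : List.IsChain (fun a b => a < b ∧ b ≤ a + st) S)
    (hmem : ∀ x ∈ S, 0 ≤ x ∧ x ≤ max (T - W) 0)
    (hhead : S.head? = some 0)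
    (hlast : S.getLast? = some (max (T - W) 0)) :
    (match pvLoopA W T S 0 [] 0 with
     | none => []
     | some (windows, prev_end) => if prev_end ≠ T then [] else windows)
    = pvWAux W T 0 S := by
  cases S with
  | nil => simp at hhead
  | cons s0 tail =>
    simp only [List.head?_cons, Option.some.injEq] at hhead
    subst hhead
    have h0e : (0:Int) < min (0 + W) T := by omega
    cases tail with
    | nil =>
      have hL0 : max (T - W) 0 = 0 := by
        simp only [List.getLast?_singleton, Option.some.injEq] at hlast
        omega
      have hmin : min (0 + W) T = T := by omega
      have hstep : pvLoopA W T [0] 0 [] 0 = some ([(0, min (0 + W) T, 0)], min (0 + W) T) := by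
        simp [pvLoopA]
        omega
      rw [hstep, hmin]
      simp [pvWAux]
      omega
    | cons t rest =>
      rw [List.isChain_cons_cons] at hchain
      obtain ⟨⟨h0t, htst⟩, hchain'⟩ := hchain
      have hmem' : ∀ x ∈ t :: rest, 0 ≤ x ∧ x ≤ max (T - W) 0 :=
        fun x hx => hmem x (List.mem_cons_of_mem _ hx)
      have htL : 0 ≤ t ∧ t ≤ max (T - W) 0 := hmem' t List.mem_cons_self
      have hWT : W < T := by omega
      have hhead' : ∀ s, (t :: rest).head? = some s →
          s ≤ min (0 + W) T ∧ min (0 + W) T < s + W ∧ min (0 + W) T < T := by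
        intro s hs
        simp only [List.head?_cons, Option.some.injEq] at hs
        subst hs
        refine ⟨by omega, by omega, by omega⟩
      have hstep : pvLoopA W T (0 :: t :: rest) 0 [] 0 =
          pvLoopA W T (t :: rest) 1 [(0, min (0 + W) T, 0)] (min (0 + W) T) := by
        simp [pvLoopA]
        omega
      rw [hstep, pvLoopA_tail W T st (max (T - W) 0) hstW rfl (t :: rest) 1 (min (0 + W) T)
            [(0, min (0 + W) T, 0)] (by omega) hchain' hmem' hhead']
      have hlast' : (t :: rest).getLast? = some (max (T - W) 0) := by
        rwa [List.getLast?_cons] at hlast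
      have hprev : ((t :: rest).map (fun s => min (s + W) T)).getLastD (min (0 + W) T) = T := by
        rw [pvMapLastD _ _ _ _ hlast']
        omega
      rw [hprev]
      simp [pvWAux]

-- the starts list A builds, and its shape properties
lemma pvS_chain (st : Int) (hst : 0 < st) (m : Nat) :
    List.IsChain (fun a b => a < b ∧ b ≤ a + st)
      ((List.range (m + 1)).map (fun k : Nat => st * (k : Int))) := by
  rw [List.isChain_map, List.isChain_range]
  intro k _
  have h1 : st * (k : Int) < st * ((k : Int) + 1) :=
    mul_lt_mul_of_pos_left (by omega) hst
  have h2 : st * ((k : Int) + 1) = st * (k : Int) + st := by ring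
  constructor <;> push_cast <;> omega

lemma pvS_last0 (st : Int) (m : Nat) :
    ((List.range (m + 1)).map (fun k : Nat => st * (k : Int))).getLast? = some (st * (m : Int)) := by
  rw [List.range_succ, List.map_append]
  simp

lemma pvS_mem (st L r : Int) (hst : 0 < st) (m : Nat)
    (hx : st * (m : Int) = L - r) (hr0 : 0 ≤ r) (hL0 : 0 ≤ L) :
    ∀ x ∈ (List.range (m + 1)).map (fun k : Nat => st * (k : Int)) ++ (if r ≠ 0 then [L] else []),
      0 ≤ x ∧ x ≤ L := by
  intro x hxmem
  rcases List.mem_append.mp hxmem with h | h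
  · obtain ⟨k, hk, rfl⟩ := List.mem_map.mp h
    have hkm : (k : Int) ≤ (m : Int) := by
      have := List.mem_range.mp hk; omega
    have h1 : st * (k : Int) ≤ st * (m : Int) := mul_le_mul_of_nonneg_left hkm hst.le
    have h2 : 0 ≤ st * (k : Int) := mul_nonneg hst.le (by positivity)
    omega
  · have : x = L := by
      by_cases hr : r = 0 <;> simp [hr] at h
      · exact h
    omega

lemma pvS_head (st : Int) (m : Nat) (l2 : List Int) :
    ((List.range (m + 1)).map (fun k : Nat => st * (k : Int)) ++ l2).head? = some 0 := by
  rw [List.range_succ_eq_map]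
  simp

-- the closed-form predecessor: floordiv (st*k + a) st = k for 0 ≤ a < st
lemma pvPredDiv (st k a : Int) (hst : 0 < st) (ha0 : 0 ≤ a) (ha : a < st) :
    PySem.Int.floordiv (st * k + a) st = k := by
  rw [PySem.Int.floordiv_eq_ediv_of_pos hst]
  have h : st * k + a = a + k * st := by ring
  rw [h, Int.add_mul_ediv_right _ _ (ne_of_gt hst), Int.ediv_eq_zero_of_lt ha0 ha]
  omega

-- B's backward walk, started at a multiple of the stride, is the reverse of pvWAux 0 on the
-- ascending multiples
lemma pvB_mul (W T st : Int) (hst : 0 < st) :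
    ∀ k : Nat, (pvLoopB W T st (st * (k : Int))).reverse =
      pvWAux W T 0 ((List.range (k + 1)).map (fun j : Nat => st * (j : Int))) := by
  intro k
  induction k with
  | zero =>
    rw [pvLoopB]
    simp [pvWAux]
  | succ k ih =>
    have hpos : 0 < st * ((k : Int) + 1) := by positivity
    rw [pvLoopB, dif_pos ⟨by push_cast; omega, hst⟩]
    have hpred : PySem.Int.floordiv (st * ((k + 1 : Nat) : Int) - 1) st * st = st * (k : Int) := by
      have h : st * ((k + 1 : Nat) : Int) - 1 = st * (k : Int) + (st - 1) := by push_cast; ring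
      rw [h, pvPredDiv st (k : Int) (st - 1) hst (by omega) (by omega)]
      ring
    rw [hpred]
    simp only [List.reverse_cons, ih]
    conv_rhs => rw [List.range_succ]
    rw [List.map_append, List.map_singleton,
      pvWAux_append W T ((List.range (k + 1)).map (fun j : Nat => st * (j : Int)))]
    congr 2
    rw [pvMapLastD _ _ (st * (k : Int)) _ (pvS_last0 st k)]

-- ===== VERDICT (by name: the statement is the Claim_ definition above) =====
theorem build_sliding_eval_windows_spec : Claim_equal_build_sliding_eval_windows := by
  intro T W st _ hpre
  obtain ⟨hW, hst, hstW⟩ := hpre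
  unfold Spec_build_sliding_eval_windows
  by_cases hT : T ≤ 0
  · simp only [build_sliding_eval_windows, build_sliding_eval_windows_alt,
      if_neg (not_le.mpr hW), if_neg (not_le.mpr hst), if_neg (not_lt.mpr hstW), if_pos hT]
  · have hTpos : 0 < T := by omega
    have hL0 : (0:Int) ≤ max (T - W) 0 := le_max_right _ _
    have hqnn : 0 ≤ max (T - W) 0 / st := Int.ediv_nonneg hL0 hst.le
    have hmcast : ((max (T - W) 0 / st).toNat : Int) = max (T - W) 0 / st :=
      Int.toNat_of_nonneg hqnn
    have hq : PySem.Int.floordiv (max (T - W) 0) st = max (T - W) 0 / st :=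
      PySem.Int.floordiv_eq_ediv_of_pos hst
    have hqr : PySem.Int.floordiv (max (T - W) 0) st * st + PySem.Int.mod (max (T - W) 0) st
        = max (T - W) 0 := PySem.Int.floordiv_mul_add_mod _ _
    have hr0 : 0 ≤ PySem.Int.mod (max (T - W) 0) st := PySem.Int.mod_nonneg _ hst
    have hrlt : PySem.Int.mod (max (T - W) 0) st < st := PySem.Int.mod_lt _ hst
    have hx : st * ((max (T - W) 0 / st).toNat : Int)
        = max (T - W) 0 - PySem.Int.mod (max (T - W) 0) st := by
      rw [hmcast, mul_comm, ← hq]; omega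
    have hstarts0 : PySem.List.pyRange 0 (max (T - W) 0 + 1) st
        = (List.range ((max (T - W) 0 / st).toNat + 1)).map (fun k : Nat => st * (k : Int)) := by
      rw [PySem.List.pyRange_of_pos _ _ hst, if_pos (by omega : (0:Int) < max (T - W) 0 + 1)]
      have he : max (T - W) 0 + 1 - 0 + st - 1 = max (T - W) 0 + 1 * st := by ring
      have hc : ((max (T - W) 0 + 1 - 0 + st - 1) / st).toNat
          = (max (T - W) 0 / st).toNat + 1 := by
        rw [he, Int.add_mul_ediv_right _ _ (by omega : st ≠ 0)]; omega
      rw [hc]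
      simp
    simp only [build_sliding_eval_windows, build_sliding_eval_windows_alt,
      if_neg (not_le.mpr hW), if_neg (not_le.mpr hst), if_neg (not_lt.mpr hstW), if_neg hT,
      hstarts0, PySem.List.pyGet?_neg_one, pvS_last0]
    by_cases hr : PySem.Int.mod (max (T - W) 0) st = 0
    · -- last_start is a multiple of the stride: nothing is appended
      rw [if_neg (by omega : ¬ st * (((max (T - W) 0 / st).toNat : Nat) : Int) ≠ max (T - W) 0)]
      have hLmul : st * (((max (T - W) 0 / st).toNat : Nat) : Int) = max (T - W) 0 := by omega
      have hlastS : ((List.range ((max (T - W) 0 / st).toNat + 1)).map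
          (fun k : Nat => st * (k : Int))).getLast? = some (max (T - W) 0) := by
        rw [pvS_last0, hLmul]
      rw [pvCore W T st hW hstW hTpos _
        (pvS_chain st hst _)
        (fun x hxm => pvS_mem st (max (T - W) 0) _ hst _ hx hr0 hL0 x
          (List.mem_append.mpr (Or.inl hxm)))
        (by simpa using pvS_head st ((max (T - W) 0 / st).toNat) [])
        hlastS]
      conv_rhs => rw [← hLmul]
      rw [pvB_mul W T st hst]
    · -- off the grid: A appends last_start; B's first backward step lands on the top multiple
      rw [if_pos (by omega : st * (((max (T - W) 0 / st).toNat : Nat) : Int) ≠ max (T - W) 0)]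
      rw [pvCore W T st hW hstW hTpos _
        (by
          rw [List.isChain_append]
          refine ⟨pvS_chain st hst _, by simp, ?_⟩
          intro a ha b hb
          rw [pvS_last0, Option.mem_def, Option.some.injEq] at ha
          simp only [List.head?_cons, Option.mem_def, Option.some.injEq] at hb
          subst ha; subst hb
          constructor <;> omega)
        (by
          have hmem := pvS_mem st (max (T - W) 0) _ hst _ hx hr0 hL0
          rwa [if_pos hr] at hmem)
        (pvS_head st _ _)
        (List.getLast?_concat)]
      have hd0 : 0 ≤ st * ((max (T - W) 0 / st).toNat : Int) := by positivity
      have hLpos : 0 < max (T - W) 0 := by omega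
      rw [pvLoopB, dif_pos ⟨hLpos, hst⟩]
      have hpred : PySem.Int.floordiv (max (T - W) 0 - 1) st * st
          = st * ((max (T - W) 0 / st).toNat : Int) := by
        have h : max (T - W) 0 - 1
            = st * ((max (T - W) 0 / st).toNat : Int)
              + (PySem.Int.mod (max (T - W) 0) st - 1) := by omega
        rw [h, pvPredDiv st ((max (T - W) 0 / st).toNat : Int)
          (PySem.Int.mod (max (T - W) 0) st - 1) hst (by omega) (by omega)]
        ring
      rw [hpred]
      simp only [List.reverse_cons, pvB_mul W T st hst]
      rw [pvWAux_append W T ((List.range ((max (T - W) 0 / st).toNat + 1)).map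
        (fun k : Nat => st * (k : Int)))]
      congr 2
      rw [pvMapLastD _ _ (st * (((max (T - W) 0 / st).toNat : Nat) : Int)) _ (pvS_last0 st _)]
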